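-- pv_equiv track=rewrite | github.com/Traigent/Traigent | .post_release_recommendation_fixes/automation/conflict_detector.py | _check_module_dependencies
-- ===== SOURCE A (Python) =====
-- def _check_module_dependencies(
--
--     modules_a: list[str],
--     modules_b: list[str],
-- ) -> list[str]:
--     """Check for module dependency conflicts.
--
--     Args:
--         modules_a: Modules from fix A
--         modules_b: Modules from fix B
--
--     Returns:
--         List of conflict descriptions
--     """
--     conflicts = []
--
--     # Check if modules are in the same package
--     for mod_a in modules_a:
--         pkg_a = mod_a.rsplit(".", 1)[0] if "." in mod_a else mod_a
--         for mod_b in modules_b: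
--             pkg_b = mod_b.rsplit(".", 1)[0] if "." in mod_b else mod_b
--
--             if pkg_a == pkg_b and mod_a != mod_b:
--                 conflicts.append(
--                     f"Same package ({pkg_a}): {mod_a.split('.')[-1]} and {mod_b.split('.')[-1]}"
--                 )
--
--     return conflicts
-- ===== SOURCE B (Python) =====
-- def _check_module_dependencies(
--     modules_a: list[str],
--     modules_b: list[str],
-- ) -> list[str]:
--     """Group modules_b by package once, then look up each mod_a's package bucket."""
--
--     def pkg(mod):
--         return mod.rsplit(".", 1)[0] if "." in mod else mod
--
--     buckets = {}
--     for mod_b in modules_b: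
--         buckets.setdefault(pkg(mod_b), []).append(mod_b)
--
--     conflicts = []
--     for mod_a in modules_a:
--         p = pkg(mod_a)
--         for mod_b in buckets.get(p, []):
--             if mod_b != mod_a:
--                 conflicts.append(
--                     f"Same package ({p}): {mod_a.split('.')[-1]} and {mod_b.split('.')[-1]}"
--                 )
--     return conflicts
-- ===== Notes on version B (the rewrite author's own statement) =====
-- stated objective: faster
-- what changed: Replaces the nested scan of modules_b for every mod_a by a one-pass dict grouping modules_b by package, so each mod_a only visits its own package's bucket.
import Mathlib
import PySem

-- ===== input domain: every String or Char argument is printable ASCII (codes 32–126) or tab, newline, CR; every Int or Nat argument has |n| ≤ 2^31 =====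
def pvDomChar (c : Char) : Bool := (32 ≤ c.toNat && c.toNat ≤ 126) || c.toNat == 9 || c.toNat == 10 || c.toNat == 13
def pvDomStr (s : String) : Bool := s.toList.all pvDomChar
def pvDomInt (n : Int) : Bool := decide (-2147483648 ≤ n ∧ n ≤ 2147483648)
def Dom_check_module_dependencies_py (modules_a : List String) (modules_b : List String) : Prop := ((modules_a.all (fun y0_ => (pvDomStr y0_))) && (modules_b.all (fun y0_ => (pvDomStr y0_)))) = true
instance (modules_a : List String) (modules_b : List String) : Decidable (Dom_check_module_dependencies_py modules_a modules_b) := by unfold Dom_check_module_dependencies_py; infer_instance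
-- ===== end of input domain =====

-- B groups modules_b by package in a dict built in one pass and looks up each mod_a's
-- package bucket, instead of A's rescan of all of modules_b for every mod_a (objective: faster).

-- ===== PORT A =====
-- mod.rsplit(".", 1)[0] if "." in mod else mod — hand port (exact: rsplit at the LAST '.'
-- keeps everything before it; when no '.' the whole string is returned).
def pyPkg (s : String) : String :=
  if PySem.Str.isIn "." s then
    String.ofList (((s.toList.reverse.dropWhile (fun c => c != '.')).drop 1).reverse)
  else s

-- mod.split('.')[-1] — hand port (exact: the part after the last '.', the whole string if none).
def pyLastPart (s : String) : String :=
  String.ofList ((s.toList.reverse.takeWhile (fun c => c != '.')).reverse)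

-- the f-string, built over List Char (exact concatenation of the literal pieces)
def pyMsg (pkg mod_a mod_b : String) : String :=
  String.ofList ("Same package (".toList ++ pkg.toList ++ "): ".toList
    ++ (pyLastPart mod_a).toList ++ " and ".toList ++ (pyLastPart mod_b).toList)

def check_module_dependencies_py (modules_a : List String) (modules_b : List String) : List String :=
  modules_a.foldl (fun conflicts mod_a =>
    let pkg_a := pyPkg mod_a
    modules_b.foldl (fun conflicts mod_b =>
      let pkg_b := pyPkg mod_b
      if pkg_a == pkg_b && mod_a != mod_b then
        conflicts ++ [pyMsg pkg_a mod_a mod_b]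
      else conflicts) conflicts) []

-- ===== PORT B =====
-- buckets.setdefault(pkg(mod_b), []).append(mod_b) over modules_b
def pvBuckets (modules_b : List String) : PySem.Dict String (List String) :=
  modules_b.foldl (fun d m => d.modify (pyPkg m) [] (fun l => l ++ [m])) PySem.Dict.empty

def check_module_dependencies_py_alt (modules_a : List String) (modules_b : List String) : List String :=
  let buckets := pvBuckets modules_b
  modules_a.foldl (fun conflicts mod_a =>
    let p := pyPkg mod_a
    (buckets.getD p []).foldl (fun conflicts mod_b =>
      if mod_b != mod_a then
        conflicts ++ [pyMsg p mod_a mod_b]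
      else conflicts) conflicts) []

-- ===== PRECONDITION & SPEC =====
def Spec_check_module_dependencies_py (modules_a : List String) (modules_b : List String) (out : List String) : Prop := out = check_module_dependencies_py_alt modules_a modules_b
instance (modules_a : List String) (modules_b : List String) (out : List String) : Decidable (Spec_check_module_dependencies_py modules_a modules_b out) := by unfold Spec_check_module_dependencies_py; infer_instance

-- ===== CLAIM (what is proved, stated in full; the proofs are below) =====
def Claim_equal_check_module_dependencies_py : Prop := ∀ (modules_a : List String) (modules_b : List String), Dom_check_module_dependencies_py modules_a modules_b → Spec_check_module_dependencies_py modules_a modules_b (check_module_dependencies_py modules_a modules_b)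

-- ===== LEMMAS AND PROOFS =====

-- the bucket of package k is exactly the modules of modules_b whose package is k, in order
lemma getD_pvBuckets (modules_b : List String) (k : String) :
    (pvBuckets modules_b).getD k [] = modules_b.filter (fun m => pyPkg m == k) := by
  have h : pvBuckets modules_b
      = (modules_b.map (fun m => (pyPkg m, m))).foldl
          (fun d p => d.modify p.1 [] (fun l => l ++ [p.2])) PySem.Dict.empty := by
    simp [pvBuckets, List.foldl_map]
  rw [h, PySem.Dict.getD_foldl_modify_append]
  simp [List.filter_map, List.map_map, Function.comp_def]

-- both inner loops, flattened to filters
lemma inner_eq (modules_b : List String) (mod_a : String) (acc : List String) :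
    modules_b.foldl (fun conflicts mod_b =>
        if pyPkg mod_a == pyPkg mod_b && mod_a != mod_b then
          conflicts ++ [pyMsg (pyPkg mod_a) mod_a mod_b] else conflicts) acc
    = ((pvBuckets modules_b).getD (pyPkg mod_a) []).foldl (fun conflicts mod_b =>
        if mod_b != mod_a then
          conflicts ++ [pyMsg (pyPkg mod_a) mod_a mod_b] else conflicts) acc := by
  rw [getD_pvBuckets,
    PySem.List.foldl_append_if (fun mod_b => pyPkg mod_a == pyPkg mod_b && mod_a != mod_b)
      (fun mod_b => pyMsg (pyPkg mod_a) mod_a mod_b),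
    PySem.List.foldl_append_if (fun mod_b => mod_b != mod_a)
      (fun mod_b => pyMsg (pyPkg mod_a) mod_a mod_b),
    List.filter_filter]
  congr 2
  apply List.filter_congr
  intro m _
  rw [Bool.and_comm]
  have h1 : (pyPkg mod_a == pyPkg m) = (pyPkg m == pyPkg mod_a) := by
    by_cases h : pyPkg mod_a = pyPkg m <;> simp [h, Ne.symm, eq_comm]
  have h2 : (mod_a != m) = (m != mod_a) := by
    by_cases h : mod_a = m <;> simp [h, bne, Ne.symm, eq_comm]
  rw [h1, h2]

theorem check_module_dependencies_equal (modules_a modules_b : List String) :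
    check_module_dependencies_py modules_a modules_b
      = check_module_dependencies_py_alt modules_a modules_b := by
  unfold check_module_dependencies_py check_module_dependencies_py_alt
  apply PySem.List.foldl_congr_mem
  intro acc mod_a _
  exact inner_eq modules_b mod_a acc

-- ===== VERDICT (by name: the statement is the Claim_ definition above) =====
theorem check_module_dependencies_py_spec : Claim_equal_check_module_dependencies_py := by
  intro modules_a modules_b _
  exact check_module_dependencies_equal modules_a modules_b
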